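-- pv_equiv track=rewrite | github.com/Jordan231111/CodeForce-Solutions | test_Waxing_Robots.py | make_simple_walls
-- ===== SOURCE A (Python) =====
-- def make_simple_walls(N=30, M=10, K=10):
--     robots = [(0,0)] + [(i+1, i+2) for i in range(M-1)]
--     lines = [f"{N} {M} {K}"]
--     lines += [f"{r} {c}" for r,c in robots]
--     v = [list("0"*(N-1)) for _ in range(N)]
--     h = [list("0"*N) for _ in range(N-1)]
--     for j in range(5,25):
--         h[10][j] = '1'
--     for i in range(5,25):
--         v[i][15] = '1'
--     v = ["".join(row) for row in v]
--     h = ["".join(row) for row in h]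
--     lines += v
--     lines += h
--     return "\n".join(lines)+"\n"
-- ===== SOURCE B (Python) =====
-- def make_simple_walls(N=30, M=10, K=10):
--     if N < 25:
--         # the hardcoded walls (v rows 5..24 at column 15, h row 10 columns 5..24) need N >= 25
--         raise IndexError("grid too small for the hardcoded walls: need N >= 25")
--     out = [f"{N} {M} {K}", "0 0"]
--     out += [f"{i+1} {i+2}" for i in range(M-1)]
--     v_special = "0"*15 + "1" + "0"*(N-17)
--     v_plain = "0"*(N-1)
--     out += [v_special if 5 <= i < 25 else v_plain for i in range(N)]
--     h_special = "0"*5 + "1"*20 + "0"*(N-25)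
--     h_plain = "0"*N
--     out += [h_special if i == 10 else h_plain for i in range(N-1)]
--     return "\n".join(out) + "\n"
-- ===== Notes on version B (the rewrite author's own statement) =====
-- stated objective: simpler
-- what changed: B validates the hardcoded wall geometry up front (raising IndexError for N<25 as A does) and then drops A's mutable list-of-lists grids and index-assignment loops, emitting each grid row directly as one of two precomputed strings chosen by the row index.
import Mathlib
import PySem

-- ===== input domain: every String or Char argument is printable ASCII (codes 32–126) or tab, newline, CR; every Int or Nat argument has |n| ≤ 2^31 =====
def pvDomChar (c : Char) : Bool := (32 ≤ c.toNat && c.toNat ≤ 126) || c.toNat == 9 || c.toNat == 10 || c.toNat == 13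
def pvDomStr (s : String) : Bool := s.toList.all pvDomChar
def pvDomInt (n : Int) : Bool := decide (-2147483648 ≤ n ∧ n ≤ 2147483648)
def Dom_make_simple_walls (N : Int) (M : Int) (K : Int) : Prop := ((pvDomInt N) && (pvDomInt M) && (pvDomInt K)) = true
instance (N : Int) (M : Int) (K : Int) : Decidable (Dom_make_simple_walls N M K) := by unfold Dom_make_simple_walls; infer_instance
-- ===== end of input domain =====

-- B replaces A's mutable list-of-lists grids and index-assignment loops by direct construction
-- of each output row string from the row index (same output by a different construction).


-- ===== PORT A =====
def make_simple_walls (N : Int) (M : Int) (K : Int) : String :=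
  let robots : List (Int × Int) :=
    (0, 0) :: (PySem.List.pyRange 0 (M - 1) 1).map (fun i => (i + 1, i + 2))
  let lines : List String :=
    [PySem.Int.toStr N ++ " " ++ PySem.Int.toStr M ++ " " ++ PySem.Int.toStr K]
  let lines := lines ++ robots.map (fun rc => PySem.Int.toStr rc.1 ++ " " ++ PySem.Int.toStr rc.2)
  let v : List (List Char) := (PySem.List.pyRange 0 N 1).map (fun _ => List.replicate (N - 1).toNat '0')
  let h : List (List Char) := (PySem.List.pyRange 0 (N - 1) 1).map (fun _ => List.replicate N.toNat '0')
  let h := (PySem.List.pyRange 5 25 1).foldl (fun h j => h.modify 10 (fun row => row.set j.toNat '1')) h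
  let v := (PySem.List.pyRange 5 25 1).foldl (fun v i => v.modify i.toNat (fun row => row.set 15 '1')) v
  let vs := v.map (fun row => String.ofList row)
  let hs := h.map (fun row => String.ofList row)
  let lines := lines ++ vs ++ hs
  PySem.Str.join "\n" lines ++ "\n"

-- ===== PORT B =====
def make_simple_walls_alt (N : Int) (M : Int) (K : Int) : String :=
  -- Python B raises IndexError here (N < 25); excluded by Pre_, so any value serves
  if N < 25 then "" else
  let out : List String :=
    [PySem.Int.toStr N ++ " " ++ PySem.Int.toStr M ++ " " ++ PySem.Int.toStr K, "0 0"]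
  let out := out ++ (PySem.List.pyRange 0 (M - 1) 1).map
    (fun i => PySem.Int.toStr (i + 1) ++ " " ++ PySem.Int.toStr (i + 2))
  let vSpecial := String.ofList (List.replicate 15 '0' ++ '1' :: List.replicate (N - 17).toNat '0')
  let vPlain := String.ofList (List.replicate (N - 1).toNat '0')
  let out := out ++ (PySem.List.pyRange 0 N 1).map (fun i => if 5 ≤ i ∧ i < 25 then vSpecial else vPlain)
  let hSpecial := String.ofList (List.replicate 5 '0' ++ List.replicate 20 '1' ++ List.replicate (N - 25).toNat '0')
  let hPlain := String.ofList (List.replicate N.toNat '0')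
  let out := out ++ (PySem.List.pyRange 0 (N - 1) 1).map (fun i => if i = 10 then hSpecial else hPlain)
  PySem.Str.join "\n" out ++ "\n"

-- ===== PRECONDITION & SPEC =====
-- Pre_ excludes exactly N ≤ 24, on which A raises IndexError (h[10] needs N-1 > 10 rows and
-- the hardcoded wall indices j,i < 25 / column 15 need N ≥ 25); A returns normally iff 25 ≤ N.
def Pre_make_simple_walls (N : Int) (M : Int) (K : Int) : Prop := 25 ≤ N
instance (N : Int) (M : Int) (K : Int) : Decidable (Pre_make_simple_walls N M K) := by
  unfold Pre_make_simple_walls; infer_instance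
def pvWitness_make_simple_walls : Int × Int × Int := (30, 10, 10)

def Spec_make_simple_walls (N : Int) (M : Int) (K : Int) (out : String) : Prop := out = make_simple_walls_alt N M K
instance (N : Int) (M : Int) (K : Int) (out : String) : Decidable (Spec_make_simple_walls N M K out) := by unfold Spec_make_simple_walls; infer_instance

-- ===== CLAIM (what is proved, stated in full; the proofs are below) =====
def Claim_equal_make_simple_walls : Prop := ∀ (N : Int) (M : Int) (K : Int), Dom_make_simple_walls N M K → Pre_make_simple_walls N M K → Spec_make_simple_walls N M K (make_simple_walls N M K)

-- ===== LEMMAS AND PROOFS =====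

-- a fold of element modifications over the index range [a, a+n) is a mapIdx
theorem fold_modify_pyRange {α : Type} (f : α → α) (a : Int) (h0 : 0 ≤ a) (n : Nat) (l : List α) :
    (PySem.List.pyRange a (a + n) 1).foldl (fun v i => v.modify i.toNat f) l
      = l.mapIdx (fun i x => if a ≤ (i : Int) ∧ (i : Int) < a + n then f x else x) := by
  induction n with
  | zero =>
    rw [show a + ((0 : Nat) : Int) = a by omega, PySem.List.pyRange_one_eq_nil (le_refl a)]
    apply List.ext_getElem
    · simp
    · intro i h1 h2
      simp only [List.foldl_nil, List.getElem_mapIdx]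
      rw [if_neg (by omega)]
  | succ n ih =>
    rw [show a + ((n + 1 : Nat) : Int) = (a + n) + 1 by push_cast; ring,
      PySem.List.pyRange_one_succ_right (by omega), List.foldl_append, ih]
    apply List.ext_getElem
    · simp
    · intro i h1 h2
      simp only [List.foldl_cons, List.foldl_nil, List.getElem_modify, List.getElem_mapIdx]
      by_cases hi : (a + n).toNat = i
      · rw [if_pos hi, if_neg (by omega), if_pos (by omega)]
      · rw [if_neg hi]
        by_cases hlo : a ≤ (i : Int) ∧ (i : Int) < a + n
        · rw [if_pos hlo, if_pos (by omega)]
        · rw [if_neg hlo, if_neg (by omega)]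

-- the same for element assignments (list.set)
theorem fold_set_pyRange {α : Type} [Inhabited α] (c : α) (a : Int) (h0 : 0 ≤ a) (n : Nat) (l : List α) :
    (PySem.List.pyRange a (a + n) 1).foldl (fun v i => v.set i.toNat c) l
      = l.mapIdx (fun i x => if a ≤ (i : Int) ∧ (i : Int) < a + n then c else x) := by
  have : (fun (v : List α) (i : Int) => v.set i.toNat c)
      = fun v i => v.modify i.toNat (fun _ => c) := by
    funext v i; exact (List.modify_eq_set (fun _ => c) i.toNat v).symm
  rw [this, fold_modify_pyRange (fun _ => c) a h0 n l]

-- repeated modification of the same index is one modification by the composite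
theorem fold_modify_same {α β : Type} (g : β → α → α) (i : Nat) (js : List β) (l : List α) :
    js.foldl (fun l j => l.modify i (g j)) l
      = l.modify i (fun x => js.foldl (fun x j => g j x) x) := by
  induction js generalizing l with
  | nil =>
    apply List.ext_getElem
    · simp
    · intro k h1 h2
      simp only [List.foldl_nil, List.getElem_modify]
      split_ifs <;> rfl
  | cons j js ih =>
    simp only [List.foldl_cons, ih]
    apply List.ext_getElem
    · simp
    · intro k h1 h2
      simp only [List.getElem_modify]
      split_ifs <;> simp_all

theorem vrow_eq (N : Int) (hN : 25 ≤ N) :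
    (List.replicate (N - 1).toNat '0').set 15 '1'
      = List.replicate 15 '0' ++ '1' :: List.replicate (N - 17).toNat '0' := by
  apply List.ext_getElem
  · simp; omega
  · intro i h1 h2
    simp only [List.getElem_set, List.getElem_replicate, List.getElem_append,
      List.getElem_cons, List.length_replicate]
    split_ifs <;> simp_all <;> omega

theorem hrow_eq (N : Int) (hN : 25 ≤ N) :
    (List.replicate N.toNat '0').mapIdx
        (fun i x => if 5 ≤ (i : Int) ∧ (i : Int) < 5 + (20 : Nat) then '1' else x)
      = List.replicate 5 '0' ++ List.replicate 20 '1' ++ List.replicate (N - 25).toNat '0' := by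
  apply List.ext_getElem
  · simp; omega
  · intro i h1 h2
    simp only [List.getElem_mapIdx, List.getElem_replicate, List.getElem_append,
      List.length_replicate, List.length_append]
    split_ifs <;> simp_all <;> omega

theorem v_lines (N : Int) (hN : 25 ≤ N) :
    ((PySem.List.pyRange 5 25 1).foldl
        (fun v i => v.modify i.toNat (fun row => row.set 15 '1'))
        ((PySem.List.pyRange 0 N 1).map (fun _ => List.replicate (N - 1).toNat '0'))).map
      (fun row => String.ofList row)
      = (PySem.List.pyRange 0 N 1).map
          (fun i => if 5 ≤ i ∧ i < 25 then
              String.ofList (List.replicate 15 '0' ++ '1' :: List.replicate (N - 17).toNat '0')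
            else String.ofList (List.replicate (N - 1).toNat '0')) := by
  rw [show (25 : Int) = 5 + ((20 : Nat) : Int) by norm_num,
    fold_modify_pyRange (fun row : List Char => row.set 15 '1') 5 (by norm_num) 20]
  apply List.ext_getElem
  · simp
  · intro k h1 h2
    simp only [List.getElem_map, List.getElem_mapIdx, PySem.List.getElem_pyRange_one, zero_add]
    by_cases hk : 5 ≤ (k : Int) ∧ (k : Int) < 25
    · rw [if_pos (by push_cast; omega), if_pos (by push_cast; omega), vrow_eq N hN]
    · rw [if_neg (by push_cast; omega), if_neg (by push_cast; omega)]

theorem h_lines (N : Int) (hN : 25 ≤ N) :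
    ((PySem.List.pyRange 5 25 1).foldl
        (fun h j => h.modify 10 (fun row => row.set j.toNat '1'))
        ((PySem.List.pyRange 0 (N - 1) 1).map (fun _ => List.replicate N.toNat '0'))).map
      (fun row => String.ofList row)
      = (PySem.List.pyRange 0 (N - 1) 1).map
          (fun i => if i = 10 then
              String.ofList (List.replicate 5 '0' ++ List.replicate 20 '1'
                ++ List.replicate (N - 25).toNat '0')
            else String.ofList (List.replicate N.toNat '0')) := by
  rw [fold_modify_same]
  have hinner : (PySem.List.pyRange 5 25 1).foldl
        (fun (r : List Char) j => r.set j.toNat '1') (List.replicate N.toNat '0')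
      = List.replicate 5 '0' ++ List.replicate 20 '1' ++ List.replicate (N - 25).toNat '0' := by
    rw [show (25 : Int) = 5 + ((20 : Nat) : Int) by norm_num,
      fold_set_pyRange '1' 5 (by norm_num) 20, hrow_eq N hN]
    norm_num
  apply List.ext_getElem
  · simp
  · intro k h1 h2
    simp only [List.getElem_map, List.getElem_modify, List.getElem_mapIdx,
      PySem.List.getElem_pyRange_one, zero_add]
    by_cases hk : k = 10
    · rw [if_pos (by omega), if_pos (by subst hk; norm_num), hinner]
    · rw [if_neg (by omega), if_neg (by intro h; apply hk; omega)]

-- ===== VERDICT (by name: the statement is the Claim_ definition above) =====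
theorem make_simple_walls_spec : Claim_equal_make_simple_walls := by
  intro N M K _hD hN
  replace hN : (25 : Int) ≤ N := hN
  unfold Spec_make_simple_walls make_simple_walls make_simple_walls_alt
  rw [if_neg (by omega)]
  refine congrArg (fun s => s ++ "\n") (congrArg (PySem.Str.join "\n") ?_)
  rw [v_lines N hN, h_lines N hN]
  simp only [List.map_cons, List.map_map, List.cons_append, List.nil_append, List.append_assoc]
  congr 1
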